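-- pv_equiv track=rewrite | github.com/dcowser3/MenuManager | services/docx-redliner/menu_redliner.py | simple_correction_example
-- ===== SOURCE A (Python) =====
-- def simple_correction_example(text: str) -> str:
--     """
--     Example correction function for testing.
--     Replace this with actual AI integration.
--     """
--     # Simple example: fix common typos
--     corrections = {
--         'avacado': 'avocado',
--         'tomatoe': 'tomato',
--         'cheeze': 'cheese',
--         'recieve': 'receive',
--     }
--
--     corrected = text
--     for wrong, right in corrections.items():
--         corrected = corrected.replace(wrong, right)
--
--     return corrected
-- ===== SOURCE B (Python) =====
-- def simple_correction_example(text: str) -> str: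
--     """Single left-to-right scan: at each position match one of the four typos
--     (they are mutually non-overlapping and no fix reintroduces a typo), so one
--     pass equals the four sequential .replace passes."""
--     corrections = {
--         'avacado': 'avocado',
--         'tomatoe': 'tomato',
--         'cheeze': 'cheese',
--         'recieve': 'receive',
--     }
--     out = []
--     i = 0
--     n = len(text)
--     while i < n:
--         for wrong, right in corrections.items():
--             if text.startswith(wrong, i):
--                 out.append(right)
--                 i += len(wrong)
--                 break
--         else:
--             out.append(text[i])
--             i += 1
--     return ''.join(out)
-- ===== Notes on version B (the rewrite author's own statement) =====
-- stated objective: alternative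
-- what changed: Replaces the four sequential whole-string .replace passes with a single left-to-right scan that matches the four typo keys at each position (the keys are mutually non-overlapping and no replacement reintroduces a key, so one pass is exactly equivalent).
import Mathlib
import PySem

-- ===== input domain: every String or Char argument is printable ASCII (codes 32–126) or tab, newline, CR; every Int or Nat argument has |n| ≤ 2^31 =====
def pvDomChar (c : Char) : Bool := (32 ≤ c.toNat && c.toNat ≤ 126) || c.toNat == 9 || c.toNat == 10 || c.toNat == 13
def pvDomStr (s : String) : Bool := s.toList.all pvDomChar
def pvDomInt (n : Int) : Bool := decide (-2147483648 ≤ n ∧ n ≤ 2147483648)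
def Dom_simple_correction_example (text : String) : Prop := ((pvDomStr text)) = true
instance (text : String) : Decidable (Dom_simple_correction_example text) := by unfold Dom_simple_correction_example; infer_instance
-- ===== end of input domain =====

-- B replaces the four sequential whole-string replace passes by one left-to-right scan; objective: alternative (same result, one pass).

-- ===== PORT A =====
-- the corrections dict literal of A
def pvCorrections : PySem.Dict String String :=
  PySem.Dict.ofList [("avacado", "avocado"), ("tomatoe", "tomato"), ("cheeze", "cheese"), ("recieve", "receive")]

def simple_correction_example (text : String) : String :=
  pvCorrections.items.foldl (fun corrected wr => PySem.Str.replace corrected wr.1 wr.2) text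

-- ===== PORT B =====
-- the four typo keys and their fixes, as char lists (Source B's dict, in order)
def pvK1 : List Char := "avacado".toList
def pvV1 : List Char := "avocado".toList
def pvK2 : List Char := "tomatoe".toList
def pvV2 : List Char := "tomato".toList
def pvK3 : List Char := "cheeze".toList
def pvV3 : List Char := "cheese".toList
def pvK4 : List Char := "recieve".toList
def pvV4 : List Char := "receive".toList

-- Source B's while-loop: at each position try the four keys in dict order (break), else copy one char
def altGo : List Char → List Char
  | [] => []
  | c :: t =>
    if pvK1.isPrefixOf (c :: t) then pvV1 ++ altGo (t.drop 6)
    else if pvK2.isPrefixOf (c :: t) then pvV2 ++ altGo (t.drop 6)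
    else if pvK3.isPrefixOf (c :: t) then pvV3 ++ altGo (t.drop 5)
    else if pvK4.isPrefixOf (c :: t) then pvV4 ++ altGo (t.drop 6)
    else c :: altGo t
termination_by s => s.length
decreasing_by all_goals simp

def simple_correction_example_alt (text : String) : String := String.ofList (altGo text.toList)

-- ===== PRECONDITION & SPEC =====
def Spec_simple_correction_example (text : String) (out : String) : Prop := out = simple_correction_example_alt text
instance (text : String) (out : String) : Decidable (Spec_simple_correction_example text out) := by unfold Spec_simple_correction_example; infer_instance

-- ===== CLAIM (what is proved, stated in full; the proofs are below) =====
def Claim_equal_simple_correction_example : Prop := ∀ (text : String), Dom_simple_correction_example text → Spec_simple_correction_example text (simple_correction_example text)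

-- ===== LEMMAS AND PROOFS =====

-- clean structural form of Python's str.replace (for nonempty `old`)
def repl (old new : List Char) : List Char → List Char
  | [] => []
  | c :: t =>
    if old.isPrefixOf (c :: t) then new ++ repl old new (t.drop (old.length - 1))
    else c :: repl old new t
termination_by s => s.length
decreasing_by all_goals simp

theorem repl_pos (old new : List Char) (c : Char) (t : List Char)
    (h : old.isPrefixOf (c :: t) = true) :
    repl old new (c :: t) = new ++ repl old new (t.drop (old.length - 1)) := by
  rw [repl]; simp [h]

theorem repl_neg (old new : List Char) (c : Char) (t : List Char)
    (h : ¬ old.isPrefixOf (c :: t) = true) :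
    repl old new (c :: t) = c :: repl old new t := by
  rw [repl]; simp [h]

theorem go_eq (old new : List Char) (hold : old ≠ [])
    (fuel : Nat) (s acc : List Char) (hf : s.length ≤ fuel) :
    PySem.Chars.replace.go old new fuel s acc = acc.reverse ++ repl old new s := by
  induction fuel generalizing s acc with
  | zero =>
    have hs : s = [] := by cases s <;> simp_all
    subst hs
    rw [PySem.Chars.replace.go, repl]
  | succ fuel ih =>
    cases s with
    | nil =>
      rw [PySem.Chars.replace.go, repl]
      all_goals simp
    | cons c t =>
      by_cases h : old.isPrefixOf (c :: t) = true
      · have hlen : 1 ≤ old.length := by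
          cases old with
          | nil => exact absurd rfl hold
          | cons o os => simp
        have hstep : PySem.Chars.replace.go old new (fuel+1) (c :: t) acc
            = PySem.Chars.replace.go old new fuel (List.drop old.length (c :: t)) (new.reverse ++ acc) := by
          rw [PySem.Chars.replace.go]; simp [h]
        have hdrop : List.drop old.length (c :: t) = List.drop (old.length - 1) t := by
          cases old with
          | nil => exact absurd rfl hold
          | cons o os => simp
        rw [hstep, hdrop, ih _ _ (by simp at hf ⊢; omega), repl_pos old new c t h]
        simp
      · have hstep : PySem.Chars.replace.go old new (fuel+1) (c :: t) acc
            = PySem.Chars.replace.go old new fuel t (c :: acc) := by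
          rw [PySem.Chars.replace.go]; simp [h]
        rw [hstep, ih _ _ (by simp at hf ⊢; omega), repl_neg old new c t h]
        simp

theorem replace_eq (old new s : List Char) (hold : old ≠ []) :
    PySem.Chars.replace s old new = repl old new s := by
  rw [PySem.Chars.replace]
  rw [if_neg (by simp [List.isEmpty_iff, hold])]
  simpa using go_eq old new hold s.length s [] le_rfl

-- a block u with no spanning/contained occurrence of old passes through repl unchanged
theorem repl_block (old new u : List Char)
    (h : ∀ i, i < u.length → ¬ (u.drop i <+: old) ∧ ¬ (old <+: u.drop i)) :
    ∀ s, repl old new (u ++ s) = u ++ repl old new s := by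
  induction u with
  | nil => intro s; simp
  | cons c u' ih =>
    intro s
    have h0 := h 0 (by simp)
    simp only [List.drop_zero] at h0
    have hnp : ¬ old.isPrefixOf (c :: (u' ++ s)) = true := by
      rw [List.isPrefixOf_iff_prefix]
      intro hp
      have hpre2 : (c :: u') <+: (c :: u') ++ s := List.prefix_append _ _
      by_cases hle : old.length ≤ (c :: u').length
      · exact h0.2 (List.prefix_of_prefix_length_le hp hpre2 hle)
      · exact h0.1 (List.prefix_of_prefix_length_le hpre2 hp (by omega))
    rw [show (c :: u') ++ s = c :: (u' ++ s) from rfl, repl_neg old new _ _ hnp,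
        ih (fun i hi => by simpa using h (i+1) (by simpa using Nat.succ_lt_succ hi))]
    simp

-- if new cannot overlap w, repl cannot create a w-prefix
theorem repl_prefix_rev (old new w : List Char)
    (hC : ∀ j, j < w.length → ¬ (w.drop j <+: new) ∧ ¬ (new <+: w.drop j)) :
    ∀ s j, j ≤ w.length → (w.drop j <+: repl old new s) → (w.drop j <+: s) := by
  intro s
  induction s using repl.induct (old := old) with
  | case1 =>
    intro j _ hp
    rw [repl] at hp
    simpa using hp
  | case2 c t h ih =>
    intro j hj hp
    rcases Nat.lt_or_ge j w.length with hlt | hge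
    · exfalso
      rw [repl_pos old new c t h] at hp
      have hC' := hC j hlt
      have hpre2 : new <+: new ++ repl old new (List.drop (old.length - 1) t) := List.prefix_append _ _
      by_cases hle : (w.drop j).length ≤ new.length
      · exact hC'.1 (List.prefix_of_prefix_length_le hp hpre2 hle)
      · exact hC'.2 (List.prefix_of_prefix_length_le hpre2 hp (by omega))
    · have : w.drop j = [] := List.drop_eq_nil_of_le (by omega)
      simp [this]
  | case3 c t h ih =>
    intro j hj hp
    rcases Nat.lt_or_ge j w.length with hlt | hge
    · rw [repl_neg old new c t h] at hp
      rw [List.drop_eq_getElem_cons hlt] at hp ⊢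
      rw [List.cons_prefix_cons] at hp ⊢
      exact ⟨hp.1, ih (j+1) (by omega) hp.2⟩
    · have : w.drop j = [] := List.drop_eq_nil_of_le (by omega)
      simp [this]

theorem not_prefix_repl (old new w : List Char)
    (hC : ∀ j, j < w.length → ¬ (w.drop j <+: new) ∧ ¬ (new <+: w.drop j))
    (s : List Char) (h : ¬ w <+: s) : ¬ w <+: repl old new s := by
  intro hp
  exact h (by simpa using repl_prefix_rev old new w hC s 0 (Nat.zero_le _) (by simpa using hp))

-- `old` at the head of the string is replaced
theorem repl_self (old new : List Char) (hold : old ≠ []) (s : List Char) :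
    repl old new (old ++ s) = new ++ repl old new s := by
  cases old with
  | nil => exact absurd rfl hold
  | cons o os =>
    rw [show (o :: os) ++ s = o :: (os ++ s) from rfl,
        repl_pos (o :: os) new o (os ++ s)
          (by rw [List.isPrefixOf_iff_prefix]; exact List.prefix_append _ _)]
    simp

-- the heart: the four sequential passes equal the single scan
theorem main_eq (s : List Char) :
    repl pvK4 pvV4 (repl pvK3 pvV3 (repl pvK2 pvV2 (repl pvK1 pvV1 s))) = altGo s := by
  induction s using altGo.induct with
  | case1 =>
    rw [altGo]
    rw [repl, repl, repl, repl]
  | case2 c t h1 ih =>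
    have hdec : c :: t = pvK1 ++ t.drop 6 := by
      have hp : pvK1 <+: (c :: t) := List.isPrefixOf_iff_prefix.mp h1
      have := List.prefix_iff_eq_take.mp hp
      rw [show (pvK1).length = 7 from by decide] at this
      calc c :: t = List.take 7 (c :: t) ++ List.drop 7 (c :: t) := by rw [List.take_append_drop]
        _ = pvK1 ++ t.drop 6 := by rw [← this]; rfl
    have hR : altGo (c :: t) = pvV1 ++ altGo (t.drop 6) := by rw [altGo]; simp [h1]
    rw [hR, hdec, repl_self pvK1 pvV1 (by decide),
        repl_block pvK2 pvV2 pvV1 (by decide),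
        repl_block pvK3 pvV3 pvV1 (by decide),
        repl_block pvK4 pvV4 pvV1 (by decide), ih]
  | case3 c t h1 h2 ih =>
    have hdec : c :: t = pvK2 ++ t.drop 6 := by
      have hp : pvK2 <+: (c :: t) := List.isPrefixOf_iff_prefix.mp h2
      have := List.prefix_iff_eq_take.mp hp
      rw [show (pvK2).length = 7 from by decide] at this
      calc c :: t = List.take 7 (c :: t) ++ List.drop 7 (c :: t) := by rw [List.take_append_drop]
        _ = pvK2 ++ t.drop 6 := by rw [← this]; rfl
    have hR : altGo (c :: t) = pvV2 ++ altGo (t.drop 6) := by rw [altGo]; simp [h1, h2]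
    rw [hR, hdec, repl_block pvK1 pvV1 pvK2 (by decide),
        repl_self pvK2 pvV2 (by decide),
        repl_block pvK3 pvV3 pvV2 (by decide),
        repl_block pvK4 pvV4 pvV2 (by decide), ih]
  | case4 c t h1 h2 h3 ih =>
    have hdec : c :: t = pvK3 ++ t.drop 5 := by
      have hp : pvK3 <+: (c :: t) := List.isPrefixOf_iff_prefix.mp h3
      have := List.prefix_iff_eq_take.mp hp
      rw [show (pvK3).length = 6 from by decide] at this
      calc c :: t = List.take 6 (c :: t) ++ List.drop 6 (c :: t) := by rw [List.take_append_drop]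
        _ = pvK3 ++ t.drop 5 := by rw [← this]; rfl
    have hR : altGo (c :: t) = pvV3 ++ altGo (t.drop 5) := by rw [altGo]; simp [h1, h2, h3]
    rw [hR, hdec, repl_block pvK1 pvV1 pvK3 (by decide),
        repl_block pvK2 pvV2 pvK3 (by decide),
        repl_self pvK3 pvV3 (by decide),
        repl_block pvK4 pvV4 pvV3 (by decide), ih]
  | case5 c t h1 h2 h3 h4 ih =>
    have hdec : c :: t = pvK4 ++ t.drop 6 := by
      have hp : pvK4 <+: (c :: t) := List.isPrefixOf_iff_prefix.mp h4
      have := List.prefix_iff_eq_take.mp hp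
      rw [show (pvK4).length = 7 from by decide] at this
      calc c :: t = List.take 7 (c :: t) ++ List.drop 7 (c :: t) := by rw [List.take_append_drop]
        _ = pvK4 ++ t.drop 6 := by rw [← this]; rfl
    have hR : altGo (c :: t) = pvV4 ++ altGo (t.drop 6) := by rw [altGo]; simp [h1, h2, h3, h4]
    rw [hR, hdec, repl_block pvK1 pvV1 pvK4 (by decide),
        repl_block pvK2 pvV2 pvK4 (by decide),
        repl_block pvK3 pvV3 pvK4 (by decide),
        repl_self pvK4 pvV4 (by decide), ih]
  | case6 c t h1 h2 h3 h4 ih =>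
    have n2 : ¬ pvK2 <+: (c :: t) := by
      rw [← List.isPrefixOf_iff_prefix]; simpa using h2
    have n3 : ¬ pvK3 <+: (c :: t) := by
      rw [← List.isPrefixOf_iff_prefix]; simpa using h3
    have n4 : ¬ pvK4 <+: (c :: t) := by
      rw [← List.isPrefixOf_iff_prefix]; simpa using h4
    have e1 : repl pvK1 pvV1 (c :: t) = c :: repl pvK1 pvV1 t := repl_neg _ _ _ _ h1
    have n2' : ¬ pvK2 <+: repl pvK1 pvV1 (c :: t) :=
      not_prefix_repl pvK1 pvV1 pvK2 (by decide) _ n2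
    have e2 : repl pvK2 pvV2 (repl pvK1 pvV1 (c :: t))
        = c :: repl pvK2 pvV2 (repl pvK1 pvV1 t) := by
      rw [e1] at n2' ⊢
      rw [repl_neg _ _ _ _ (by rw [List.isPrefixOf_iff_prefix]; exact n2')]
    have n3' : ¬ pvK3 <+: repl pvK2 pvV2 (repl pvK1 pvV1 (c :: t)) :=
      not_prefix_repl pvK2 pvV2 pvK3 (by decide) _
        (not_prefix_repl pvK1 pvV1 pvK3 (by decide) _ n3)
    have e3 : repl pvK3 pvV3 (repl pvK2 pvV2 (repl pvK1 pvV1 (c :: t)))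
        = c :: repl pvK3 pvV3 (repl pvK2 pvV2 (repl pvK1 pvV1 t)) := by
      rw [e2] at n3' ⊢
      rw [repl_neg _ _ _ _ (by rw [List.isPrefixOf_iff_prefix]; exact n3')]
    have n4' : ¬ pvK4 <+: repl pvK3 pvV3 (repl pvK2 pvV2 (repl pvK1 pvV1 (c :: t))) :=
      not_prefix_repl pvK3 pvV3 pvK4 (by decide) _
        (not_prefix_repl pvK2 pvV2 pvK4 (by decide) _
          (not_prefix_repl pvK1 pvV1 pvK4 (by decide) _ n4))
    have e4 : repl pvK4 pvV4 (repl pvK3 pvV3 (repl pvK2 pvV2 (repl pvK1 pvV1 (c :: t))))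
        = c :: repl pvK4 pvV4 (repl pvK3 pvV3 (repl pvK2 pvV2 (repl pvK1 pvV1 t))) := by
      rw [e3] at n4' ⊢
      rw [repl_neg _ _ _ _ (by rw [List.isPrefixOf_iff_prefix]; exact n4')]
    have hR : altGo (c :: t) = c :: altGo t := by rw [altGo]; simp [h1, h2, h3, h4]
    rw [e4, hR, ih]

-- ===== VERDICT (by name: the statement is the Claim_ definition above) =====
theorem simple_correction_example_spec : Claim_equal_simple_correction_example := by
  intro text _
  unfold Spec_simple_correction_example
  show simple_correction_example text = simple_correction_example_alt text
  have hA : simple_correction_example text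
      = PySem.Str.replace (PySem.Str.replace (PySem.Str.replace
          (PySem.Str.replace text "avacado" "avocado") "tomatoe" "tomato") "cheeze" "cheese")
          "recieve" "receive" := rfl
  have hlist : (PySem.Str.replace (PySem.Str.replace (PySem.Str.replace
          (PySem.Str.replace text "avacado" "avocado") "tomatoe" "tomato") "cheeze" "cheese")
          "recieve" "receive").toList = altGo text.toList := by
    simp only [PySem.Str.toList_replace]
    rw [replace_eq _ _ _ (by decide), replace_eq _ _ _ (by decide),
        replace_eq _ _ _ (by decide), replace_eq _ _ _ (by decide)]
    exact main_eq text.toList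
  rw [hA, show simple_correction_example_alt text = String.ofList (altGo text.toList) from rfl,
      ← hlist, String.ofList_toList]
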